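-- pv_equiv track=rewrite | github.com/tuanaozkaaan/Ac-badem-chatbot | chatbot/chunking/service.py | _overlap_tail
-- ===== SOURCE A (Python) =====
-- def _overlap_tail(sentences: list[str], overlap_chars: int) -> list[str]:
--     if overlap_chars <= 0:
--         return []
--     selected: list[str] = []
--     total = 0
--     for sentence in reversed(sentences):
--         sentence_len = len(sentence) + (1 if selected else 0)
--         if selected and total + sentence_len > overlap_chars:
--             break
--         selected.append(sentence)
--         total += sentence_len
--     selected.reverse()
--     return selected
-- ===== SOURCE B (Python) =====
-- def _overlap_tail(sentences: list[str], overlap_chars: int) -> list[str]: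
--     if overlap_chars <= 0 or not sentences:
--         return []
--     # cumulative cost of keeping the last 1, 2, ... sentences (separator = 1 char)
--     rev = sentences[::-1]
--     cum = [len(rev[0])]
--     for s in rev[1:]:
--         cum.append(cum[-1] + len(s) + 1)
--     count = max(1, sum(1 for c in cum if c <= overlap_chars))
--     return sentences[len(sentences) - count:]
-- ===== Notes on version B (the rewrite author's own statement) =====
-- stated objective: alternative
-- what changed: Replaces A's single reverse loop with break and end-reversal by a two-phase decomposition: build the cumulative cost list of trailing suffixes, count the affordable ones (floored at 1), and slice sentences[-count:] directly.
import Mathlib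
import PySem

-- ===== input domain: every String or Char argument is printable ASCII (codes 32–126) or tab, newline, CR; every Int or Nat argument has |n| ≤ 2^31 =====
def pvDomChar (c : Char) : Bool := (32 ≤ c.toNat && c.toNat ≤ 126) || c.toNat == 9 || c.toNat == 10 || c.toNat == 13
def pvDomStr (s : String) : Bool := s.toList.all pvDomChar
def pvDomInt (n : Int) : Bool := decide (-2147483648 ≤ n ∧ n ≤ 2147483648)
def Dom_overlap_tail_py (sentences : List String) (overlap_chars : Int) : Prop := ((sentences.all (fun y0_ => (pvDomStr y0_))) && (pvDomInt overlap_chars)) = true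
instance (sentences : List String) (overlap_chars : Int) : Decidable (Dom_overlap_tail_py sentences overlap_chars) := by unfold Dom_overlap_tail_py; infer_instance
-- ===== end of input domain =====

-- B replaces A's single reverse loop with a cumulative-cost scan plus a count of
-- affordable suffix lengths (floored at 1); objective: alternative decomposition.

-- ===== PORT A =====
-- literal port of A's for-loop over reversed(sentences) with break
def overlapTailLoopA (overlap_chars : Int) : List String → List String → Int → List String
  | [], selected, _ => selected
  | s :: rest, selected, total =>
      let sentence_len : Int := PySem.Str.len s + (if selected.isEmpty then 0 else 1)
      if (¬ selected.isEmpty) ∧ total + sentence_len > overlap_chars then selected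
      else overlapTailLoopA overlap_chars rest (selected ++ [s]) (total + sentence_len)

def overlap_tail_py (sentences : List String) (overlap_chars : Int) : List String :=
  if overlap_chars ≤ 0 then []
  else (overlapTailLoopA overlap_chars sentences.reverse [] 0).reverse

-- ===== PORT B =====
-- B's loop: cum.append(cum[-1] + len(s) + 1) over rev[1:]
def overlapTailScanB : List String → Int → List Int
  | [], _ => []
  | s :: rest, last =>
      let c := last + PySem.Str.len s + 1
      c :: overlapTailScanB rest c

def overlap_tail_py_alt (sentences : List String) (overlap_chars : Int) : List String :=
  if overlap_chars ≤ 0 ∨ sentences = [] then []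
  else
    let rev := sentences.reverse
    -- rev[0] / rev[1:]: rev is nonempty in this branch, so headD/tail are exact
    let l0 : Int := PySem.Str.len (rev.headD "")
    let cum : List Int := l0 :: overlapTailScanB rev.tail l0
    let count : Nat := max 1 (cum.countP (fun c => decide (c ≤ overlap_chars)))
    sentences.drop (sentences.length - count)

-- ===== PRECONDITION & SPEC =====
def Spec_overlap_tail_py (sentences : List String) (overlap_chars : Int) (out : List String) : Prop := out = overlap_tail_py_alt sentences overlap_chars
instance (sentences : List String) (overlap_chars : Int) (out : List String) : Decidable (Spec_overlap_tail_py sentences overlap_chars out) := by unfold Spec_overlap_tail_py; infer_instance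

-- ===== CLAIM (what is proved, stated in full; the proofs are below) =====
def Claim_equal_overlap_tail_py : Prop := ∀ (sentences : List String) (overlap_chars : Int), Dom_overlap_tail_py sentences overlap_chars → Spec_overlap_tail_py sentences overlap_chars (overlap_tail_py sentences overlap_chars)

-- ===== LEMMAS AND PROOFS =====

-- number of sentences A's loop still takes after the first, starting at running total `total`
def prefCount (B : Int) : List String → Int → Nat
  | [], _ => 0
  | s :: rest, total =>
      if total + (PySem.Str.len s + 1) > B then 0
      else 1 + prefCount B rest (total + (PySem.Str.len s + 1))

theorem prefCount_le (B : Int) (l : List String) (t : Int) : prefCount B l t ≤ l.length := by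
  induction l generalizing t with
  | nil => simp [prefCount]
  | cons s rest ih =>
    simp only [prefCount, List.length_cons]
    split
    · omega
    · have := ih (t + (PySem.Str.len s + 1)); omega

theorem loopA_nonempty (B : Int) (rest sel : List String) (total : Int) (h : sel ≠ []) :
    overlapTailLoopA B rest sel total = sel ++ rest.take (prefCount B rest total) := by
  induction rest generalizing sel total with
  | nil => simp [overlapTailLoopA, prefCount]
  | cons s rs ih =>
    have hne : sel.isEmpty = false := by simpa [List.isEmpty_iff] using h
    simp only [overlapTailLoopA, prefCount, hne, PySem.Str.len_eq, Bool.false_eq_true,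
      if_false, not_false_eq_true, true_and, gt_iff_lt]
    split_ifs with hb
    · simp
    · rw [ih (sel ++ [s]) _ (by simp)]
      rw [Nat.add_comm, List.take_succ_cons]
      simp

theorem scanB_ge (rest : List String) (t x : Int) (hx : x ∈ overlapTailScanB rest t) : t ≤ x := by
  induction rest generalizing t with
  | nil => simp [overlapTailScanB] at hx
  | cons s rs ih =>
    simp only [overlapTailScanB, List.mem_cons] at hx
    have hlen : (0:Int) ≤ PySem.Str.len s := by
      rw [PySem.Str.len_eq]; exact Int.natCast_nonneg _
    rcases hx with rfl | hx
    · omega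
    · have := ih _ hx; omega

theorem countP_scanB (B : Int) (rest : List String) (t : Int) :
    (overlapTailScanB rest t).countP (fun c => decide (c ≤ B)) = prefCount B rest t := by
  induction rest generalizing t with
  | nil => simp [overlapTailScanB, prefCount]
  | cons s rs ih =>
    simp only [overlapTailScanB, prefCount, List.countP_cons, PySem.Str.len_eq, gt_iff_lt,
      decide_eq_true_eq]
    rw [show t + (s.toList.length : Int) + 1 = t + ((s.toList.length : Int) + 1) from by ring]
    by_cases hb : B < t + ((s.toList.length : Int) + 1)
    · rw [if_pos hb, if_neg (by omega)]
      have h0 : (overlapTailScanB rs (t + ((s.toList.length : Int) + 1))).countP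
          (fun c => decide (c ≤ B)) = 0 := by
        rw [List.countP_eq_zero]
        intro x hx
        have := scanB_ge rs _ x hx
        simp only [decide_eq_true_eq]
        omega
      rw [h0]
    · rw [if_neg hb, if_pos (by omega), ih]
      omega

theorem main_eq (sentences : List String) (overlap_chars : Int) :
    overlap_tail_py sentences overlap_chars = overlap_tail_py_alt sentences overlap_chars := by
  unfold overlap_tail_py overlap_tail_py_alt
  by_cases hoc : overlap_chars ≤ 0
  · simp [hoc]
  by_cases hs : sentences = []
  · subst hs; simp [hoc, overlapTailLoopA]
  rw [if_neg hoc, if_neg (not_or.mpr ⟨hoc, hs⟩)]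
  obtain ⟨r0, rest, hrev⟩ : ∃ r0 rest, sentences.reverse = r0 :: rest := by
    rcases h : sentences.reverse with _ | ⟨a, b⟩
    · exact absurd (by simpa using congrArg List.reverse h) hs
    · exact ⟨a, b, rfl⟩
  rw [hrev]
  simp only [List.headD_cons, List.tail_cons]
  have hfirst : overlapTailLoopA overlap_chars (r0 :: rest) [] 0
      = overlapTailLoopA overlap_chars rest [r0] (PySem.Str.len r0) := by
    simp [overlapTailLoopA]
  rw [hfirst, loopA_nonempty _ _ _ _ (by simp)]
  set k : Nat := prefCount overlap_chars rest (PySem.Str.len r0) with hk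
  have hcount : max 1 ((PySem.Str.len r0 :: overlapTailScanB rest (PySem.Str.len r0)).countP
      (fun c => decide (c ≤ overlap_chars))) = 1 + k := by
    rw [List.countP_cons, countP_scanB]
    by_cases h0 : PySem.Str.len r0 ≤ overlap_chars
    · simp only [decide_eq_true_eq]
      rw [if_pos h0]
      omega
    · have hk0 : k = 0 := by
        rw [hk]
        cases rest with
        | nil => simp [prefCount]
        | cons s rs =>
          have hlen : (0:Int) ≤ PySem.Str.len s := by
            rw [PySem.Str.len_eq]; exact Int.natCast_nonneg _
          simp only [prefCount, gt_iff_lt]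
          rw [if_pos (by omega)]
      simp only [decide_eq_true_eq]
      rw [if_neg h0]
      omega
  rw [List.countP_cons] at hcount
  rw [List.countP_cons, hcount]
  have hsent : sentences = rest.reverse ++ [r0] := by
    simpa using congrArg List.reverse hrev
  have hkle : k ≤ rest.length := hk ▸ prefCount_le _ _ _
  rw [hsent]
  have hlenS : (rest.reverse ++ [r0]).length = rest.length + 1 := by simp
  have hdropn : rest.length + 1 - (1 + k) = rest.length - k := by omega
  rw [hlenS, hdropn, List.drop_append_of_le_length (by simp)]
  have htake : (rest.take k).reverse = rest.reverse.drop (rest.length - k) := by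
    rw [List.reverse_take]
  rw [List.reverse_append, htake]
  simp

-- ===== VERDICT (by name: the statement is the Claim_ definition above) =====
theorem overlap_tail_py_spec : Claim_equal_overlap_tail_py := by
  intro sentences overlap_chars _
  unfold Spec_overlap_tail_py
  exact main_eq sentences overlap_chars
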